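-- pv_equiv track=rewrite | github.com/Tungtom2004/ICPC | LT1/b4.py | min_colors_needed
-- ===== SOURCE A (Python) =====
-- import bisect
--
-- def min_colors_needed(a):
--     res = []
--     for i in a:
--         pos = bisect.bisect_right(res, -i)
--         if pos == len(res):
--             res.append(-i)
--         else:
--             res[pos] = -i
--     return len(res)
-- ===== SOURCE B (Python) =====
-- def min_colors_needed(a):
--     # O(n^2) DP: dp holds (value, length of longest non-increasing subsequence ending there)
--     dp = []
--     for x in a:
--         m = 0
--         for v, d in dp:
--             if v >= x and d > m:
--                 m = d
--         dp.append((x, m + 1))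
--     best = 0
--     for _, d in dp:
--         if d > best:
--             best = d
--     return best
-- ===== Notes on version B (the rewrite author's own statement) =====
-- stated objective: alternative
-- what changed: Replaces the bisect-maintained 'tails' array (patience-sorting length) with the classic O(n^2) dynamic program over longest non-increasing subsequences ending at each element, returning the maximum dp value.
import Mathlib
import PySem

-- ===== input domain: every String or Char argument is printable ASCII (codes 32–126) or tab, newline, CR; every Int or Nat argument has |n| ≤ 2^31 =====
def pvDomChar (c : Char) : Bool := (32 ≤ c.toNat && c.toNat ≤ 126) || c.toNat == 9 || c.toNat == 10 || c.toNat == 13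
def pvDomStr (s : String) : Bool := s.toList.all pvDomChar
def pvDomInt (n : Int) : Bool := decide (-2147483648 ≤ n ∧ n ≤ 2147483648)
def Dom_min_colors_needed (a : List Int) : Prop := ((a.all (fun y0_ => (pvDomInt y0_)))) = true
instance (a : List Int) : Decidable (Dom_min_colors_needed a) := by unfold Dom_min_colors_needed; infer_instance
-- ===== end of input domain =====

-- B replaces the bisect 'tails' maintenance with the classic O(n^2) DP over longest
-- non-increasing subsequences; alternative decomposition, not faster.

-- ===== PORT A =====
-- bisect.bisect_right(res, v) on the (always sorted) list res = number of elements ≤ v;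
-- exact on sorted lists, and res stays sorted throughout the loop.
def aStep (res : List Int) (i : Int) : List Int :=
  if res.countP (fun y => decide (y ≤ -i)) = res.length then res ++ [-i]
  else res.set (res.countP (fun y => decide (y ≤ -i))) (-i)

def min_colors_needed (a : List Int) : Int :=
  ((a.foldl aStep []).length : Int)

-- ===== PORT B =====
-- dp holds pairs (value, length of longest non-increasing subsequence ending there)
def bStep (s : List (Int × Int)) (x : Int) : List (Int × Int) :=
  let m := s.foldl (fun m vd => if vd.1 ≥ x ∧ vd.2 > m then vd.2 else m) 0
  s ++ [(x, m + 1)]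

def min_colors_needed_alt (a : List Int) : Int :=
  (a.foldl bStep []).foldl (fun best vd => if vd.2 > best then vd.2 else best) 0

-- ===== PRECONDITION & SPEC =====
def Spec_min_colors_needed (a : List Int) (out : Int) : Prop := out = min_colors_needed_alt a
instance (a : List Int) (out : Int) : Decidable (Spec_min_colors_needed a out) := by unfold Spec_min_colors_needed; infer_instance

-- ===== CLAIM (what is proved, stated in full; the proofs are below) =====
def Claim_equal_min_colors_needed : Prop := ∀ (a : List Int), Dom_min_colors_needed a → Spec_min_colors_needed a (min_colors_needed a)

-- ===== LEMMAS AND PROOFS =====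

-- max dp-value among entries of s whose value is ≥ -t (0 if none)
def msel (s : List (Int × Int)) (t : Int) : Int :=
  s.foldl (fun m vd => if vd.1 ≥ -t ∧ vd.2 > m then vd.2 else m) 0

-- max dp-value among all entries of s (0 if none)
def maxall (s : List (Int × Int)) : Int :=
  s.foldl (fun m vd => if vd.2 > m then vd.2 else m) 0

-- The simulation invariant between A's tails list and B's dp list
def INV (res : List Int) (s : List (Int × Int)) : Prop :=
  res.Pairwise (· ≤ ·) ∧
  (∀ t : Int, ((res.countP (fun y => decide (y ≤ t)) : Int) = msel s t)) ∧
  ((res.length : Int) = maxall s)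

theorem msel_append (s : List (Int × Int)) (vd : Int × Int) (t : Int) :
    msel (s ++ [vd]) t = if vd.1 ≥ -t ∧ vd.2 > msel s t then vd.2 else msel s t := by
  simp [msel, List.foldl_append]

theorem maxall_append (s : List (Int × Int)) (vd : Int × Int) :
    maxall (s ++ [vd]) = if vd.2 > maxall s then vd.2 else maxall s := by
  simp [maxall, List.foldl_append]

theorem bStep_eq (s : List (Int × Int)) (i : Int) :
    bStep s i = s ++ [(i, msel s (-i) + 1)] := by
  simp [bStep, msel, neg_neg]

theorem set_len_append (T : List Int) (w b : Int) (D : List Int) :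
    (T ++ w :: D).set T.length b = T ++ b :: D := by
  induction T with
  | nil => rfl
  | cons h t ih => simp [ih]

theorem dropWhile_head_false {p : Int → Bool} (l : List Int) (w : Int) (D : List Int)
    (h : l.dropWhile p = w :: D) : p w = false := by
  induction l with
  | nil => simp [List.dropWhile] at h
  | cons a t ih =>
    by_cases hp : p a
    · simp [List.dropWhile, hp] at h; exact ih h
    · simp [List.dropWhile, hp] at h
      rw [← h.1]; simpa using hp

theorem inv_step (res : List Int) (s : List (Int × Int)) (i : Int)
    (h : INV res s) : INV (aStep res i) (bStep s i) := by
  obtain ⟨hsort, hcnt, hlen⟩ := h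
  rw [bStep_eq]
  unfold aStep
  by_cases hp : res.countP (fun y => decide (y ≤ -i)) = res.length
  · rw [if_pos hp]
    have hall : ∀ y ∈ res, y ≤ -i := by
      intro y hy
      simpa using List.countP_eq_length.mp hp y hy
    have hM : msel s (-i) = (res.length : Int) := by rw [← hcnt (-i), hp]
    refine ⟨?_, ?_, ?_⟩
    · rw [List.pairwise_append]
      refine ⟨hsort, List.pairwise_singleton _ _, ?_⟩
      intro a ha b hb
      simp only [List.mem_singleton] at hb
      subst hb
      exact hall a ha
    · intro t
      rw [msel_append]
      have hc := hcnt t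
      have hLHS : (res ++ [-i]).countP (fun y => decide (y ≤ t))
          = res.countP (fun y => decide (y ≤ t)) + (if -i ≤ t then 1 else 0) := by
        simp [List.countP_append, List.countP_cons]
      by_cases ht : -i ≤ t
      · have hge : res.countP (fun y => decide (y ≤ -i)) ≤ res.countP (fun y => decide (y ≤ t)) :=
          List.countP_mono_left (by intro a _ hpa; simp at hpa ⊢; omega)
        have hle : res.countP (fun y => decide (y ≤ t)) ≤ res.length := List.countP_le_length
        have hceq : res.countP (fun y => decide (y ≤ t)) = res.length := le_antisymm hle (hp ▸ hge)
        have hcond : (i ≥ -t ∧ msel s (-i) + 1 > msel s t) := by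
          refine ⟨by omega, ?_⟩
          rw [← hc, hceq, hM]
          omega
        rw [if_pos hcond, hLHS, if_pos ht, hceq, hM]
        push_cast
        omega
      · have hcond : ¬ (i ≥ -t ∧ msel s (-i) + 1 > msel s t) := by
          intro hco
          omega
        rw [if_neg hcond, hLHS, if_neg ht, ← hc]
        push_cast
        omega
    · rw [maxall_append]
      have hma : maxall s = (res.length : Int) := hlen.symm
      rw [if_pos (by rw [hma, hM]; omega)]
      rw [hM]
      simp
  · rw [if_neg hp]
    have hplt : res.countP (fun y => decide (y ≤ -i)) < res.length :=
      lt_of_le_of_ne List.countP_le_length hp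
    have hTD := List.takeWhile_append_dropWhile (p := fun y => decide (y ≤ -i)) (l := res)
    have hTall : ∀ y ∈ res.takeWhile (fun y => decide (y ≤ -i)), y ≤ -i := by
      intro y hy
      simpa using List.mem_takeWhile_imp hy
    set T := res.takeWhile (fun y => decide (y ≤ -i)) with hTdef
    cases hD : res.dropWhile (fun y => decide (y ≤ -i)) with
    | nil =>
      exfalso
      rw [hD, List.append_nil] at hTD
      have : res.countP (fun y => decide (y ≤ -i)) = res.length :=
        List.countP_eq_length.mpr (by intro a ha; rw [← hTD] at ha; simpa using hTall a ha)
      exact hp this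
    | cons w D' =>
      have hpw : decide (w ≤ -i) = false := dropWhile_head_false res w D' hD
      have hwgt : -i < w := by simpa using hpw
      rw [hD] at hTD
      have hs' := hsort
      rw [← hTD, List.pairwise_append] at hs'
      obtain ⟨pT, pwD, cross⟩ := hs'
      rw [List.pairwise_cons] at pwD
      obtain ⟨hwD', pD'⟩ := pwD
      have hcpos : res.countP (fun y => decide (y ≤ -i)) = T.length := by
        conv_lhs => rw [← hTD]
        rw [List.countP_append]
        have h1 : T.countP (fun y => decide (y ≤ -i)) = T.length :=
          List.countP_eq_length.mpr (by intro a ha; simpa using hTall a ha)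
        have h2 : (w :: D').countP (fun y => decide (y ≤ -i)) = 0 :=
          List.countP_eq_zero.mpr (by
            intro a ha
            simp only [List.mem_cons] at ha
            rcases ha with rfl | ha
            · simpa using hpw
            · have := hwD' a ha
              simp only [decide_eq_true_eq]
              omega)
        rw [h1, h2]
        omega
      have hset : res.set (res.countP (fun y => decide (y ≤ -i))) (-i) = T ++ (-i) :: D' := by
        conv_lhs => rw [hcpos, ← hTD]
        exact set_len_append T w (-i) D'
      rw [hset]
      have hM : msel s (-i) = (T.length : Int) := by
        rw [← hcnt (-i), hcpos]
      have hlen2 : res.length = T.length + 1 + D'.length := by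
        conv_lhs => rw [← hTD]
        simp [List.length_append]
        omega
      refine ⟨?_, ?_, ?_⟩
      · rw [List.pairwise_append]
        refine ⟨pT, ?_, ?_⟩
        · rw [List.pairwise_cons]
          exact ⟨by intro y hy; have := hwD' y hy; omega, pD'⟩
        · intro a ha b hb
          have haT := hTall a ha
          simp only [List.mem_cons] at hb
          rcases hb with rfl | hb
          · exact haT
          · have := hwD' b hb; omega
      · intro t
        rw [msel_append]
        have hc := hcnt t
        conv_lhs at hc => rw [← hTD]
        rw [List.countP_append, List.countP_cons] at hc
        rw [List.countP_append, List.countP_cons]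
        by_cases ht : -i ≤ t
        · have hTq : T.countP (fun y => decide (y ≤ t)) = T.length :=
            List.countP_eq_length.mpr (by
              intro a ha; have := hTall a ha; simp only [decide_eq_true_eq]; omega)
          by_cases hwt : w ≤ t
          · have hmst : msel s t
                = (T.length : Int) + (D'.countP (fun y => decide (y ≤ t)) : Int) + 1 := by
              rw [← hc, hTq]
              simp only [decide_eq_true_eq, if_pos hwt]
              push_cast
              ring
            have hcond : ¬ (i ≥ -t ∧ msel s (-i) + 1 > msel s t) := by
              rw [hmst, hM]
              intro hco
              omega
            rw [if_neg hcond, ← hc]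
            simp only [decide_eq_true_eq, if_pos ht, if_pos hwt]
          · have hD'q : D'.countP (fun y => decide (y ≤ t)) = 0 :=
              List.countP_eq_zero.mpr (by
                intro a ha
                have := hwD' a ha
                simp only [decide_eq_true_eq]
                omega)
            have hmst : msel s t = (T.length : Int) := by
              rw [← hc, hTq, hD'q]
              simp only [decide_eq_true_eq, if_neg hwt]
              push_cast
              ring
            have hcond : (i ≥ -t ∧ msel s (-i) + 1 > msel s t) := by
              refine ⟨by omega, ?_⟩
              rw [hmst, hM]
              omega
            rw [if_pos hcond, hTq, hD'q, hM]
            simp only [decide_eq_true_eq, if_pos ht]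
            push_cast
            omega
        · have hwt : ¬ w ≤ t := by omega
          have hcond : ¬ (i ≥ -t ∧ msel s (-i) + 1 > msel s t) := by
            intro hco
            omega
          rw [if_neg hcond, ← hc]
          simp only [decide_eq_true_eq, if_neg ht, if_neg hwt]
      · rw [maxall_append]
        rw [if_neg ?_]
        · rw [← hlen]
          push_cast [List.length_append, List.length_cons, hlen2]
          omega
        · rw [← hlen, hM]
          push_cast [hlen2]
          omega

theorem inv_foldl (a : List Int) : ∀ (res : List Int) (s : List (Int × Int)),
    INV res s → INV (a.foldl aStep res) (a.foldl bStep s) := by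
  induction a with
  | nil => intro res s h; exact h
  | cons x t ih => intro res s h; exact ih _ _ (inv_step res s x h)

-- ===== VERDICT (by name: the statement is the Claim_ definition above) =====
theorem min_colors_needed_spec : Claim_equal_min_colors_needed := by
  intro a _
  have h := inv_foldl a [] [] ⟨List.Pairwise.nil, by intro t; simp [msel], by simp [maxall]⟩
  exact h.2.2
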